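-- pv_equiv track=rewrite | github.com/owenyi/JDBC | 00_algorithm/Stage1/08_Dijkstra/problem3.py | solution
-- ===== SOURCE A (Python) =====
-- import heapq
--
-- def solution(n, edge):
--     graph = [[] for _ in range(n + 1)]
--     for a, b in edge:
--         graph[a].append(b)
--         graph[b].append(a)
--     distance = [50000] * (n + 1)
--
--     q = []
--     heapq.heappush(q, (0, 1))
--     distance[1] = 0
--
--     while q:
--         dist, now = heapq.heappop(q)
--         if distance[now] < dist: continue
--         for g in graph[now]:
--             cost = dist + 1
--             if cost < distance[g]:
--                 distance[g] = cost
--                 heapq.heappush(q, (cost, g))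
--
--     return distance.count(max(distance[1:]))
-- ===== SOURCE B (Python) =====
-- def solution(n, edge):
--     # FIFO BFS: with unit weights every vertex settles on its first
--     # improvement, so no heap and no decrease-key re-pushes are needed.
--     INF = 50000
--     graph = [[] for _ in range(n + 1)]
--     for a, b in edge:
--         graph[a].append(b)
--         graph[b].append(a)
--     dist = [INF] * (n + 1)
--     dist[1] = 0
--     queue = [1]
--     i = 0
--     while i < len(queue):
--         v = queue[i]
--         i += 1
--         for w in graph[v]:
--             if dist[v] + 1 < dist[w]:
--                 dist[w] = dist[v] + 1
--                 queue.append(w)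
--     return dist.count(max(dist[1:]))
-- ===== Notes on version B (the rewrite author's own statement) =====
-- stated objective: alternative
-- what changed: Replaced heap-based Dijkstra (heapq push/pop with stale-entry skip checks) by a plain FIFO breadth-first search, which is exact because every edge has weight 1, so each vertex settles on its first improvement and no priority queue is needed.
import Mathlib
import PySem

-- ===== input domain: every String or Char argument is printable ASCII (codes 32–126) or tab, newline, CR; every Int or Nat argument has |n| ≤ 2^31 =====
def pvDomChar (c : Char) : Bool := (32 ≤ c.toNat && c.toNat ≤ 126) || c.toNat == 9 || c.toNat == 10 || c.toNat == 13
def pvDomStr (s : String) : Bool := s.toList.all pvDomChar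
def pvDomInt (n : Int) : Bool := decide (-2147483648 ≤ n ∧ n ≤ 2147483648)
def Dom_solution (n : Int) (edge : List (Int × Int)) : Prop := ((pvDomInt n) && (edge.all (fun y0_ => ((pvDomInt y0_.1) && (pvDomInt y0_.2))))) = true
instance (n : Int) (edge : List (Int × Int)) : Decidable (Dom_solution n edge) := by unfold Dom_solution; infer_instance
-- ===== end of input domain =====

-- B replaces A's heap-based Dijkstra by a FIFO breadth-first search, exact because all
-- edge weights are 1. Both 'while' loops are ported as fuel recursion; the fuel
-- pvFuel n is proved sufficient on Pre_ inputs.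

-- ===== PORT A =====
-- shared by both ports (both Pythons build the graph, the initial distance array and
-- the final count the same way)
def pvAppendAt (g : List (List Int)) (i : Int) (x : Int) : List (List Int) :=
  PySem.List.pySetD g i (PySem.List.pyGetD g i [] ++ [x])   -- g[i].append(x)

def pvBuildGraph (n : Int) (edge : List (Int × Int)) : List (List Int) :=
  edge.foldl (fun g p => pvAppendAt (pvAppendAt g p.1 p.2) p.2 p.1)
    (List.replicate (n + 1).toNat [])

def pvInitDist (n : Int) : List Int :=
  PySem.List.pySetD (List.replicate (n + 1).toNat (50000 : Int)) 1 0

-- fuel for the ported while-loops (any bound ≥ sum of distances + queue length works;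
-- sufficiency on Pre_ inputs is proved below)
def pvFuel (n : Int) : Nat := 50001 * (n + 1).toNat + 1

-- heapq on a plain list: pop extracts the lexicographically least (dist, node) pair
def pvHeapMin (x : Int × Int) (xs : List (Int × Int)) : Int × Int :=
  xs.foldl (fun m e => if e.1 < m.1 ∨ (e.1 = m.1 ∧ e.2 < m.2) then e else m) x

def pvHeapPop : List (Int × Int) → Option ((Int × Int) × List (Int × Int))
  | [] => none
  | x :: xs => some (pvHeapMin x xs, (x :: xs).erase (pvHeapMin x xs))

-- body of A's inner 'for g in graph[now]' loop
def pvStepA (d : Int) (s : List Int × List (Int × Int)) (g : Int) :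
    List Int × List (Int × Int) :=
  let cost := d + 1
  if cost < PySem.List.pyGetD s.1 g 0 then
    (PySem.List.pySetD s.1 g cost, s.2 ++ [(cost, g)])
  else s

def pvALoop (graph : List (List Int)) : Nat → List Int → List (Int × Int) → List Int
  | 0, dist, _ => dist
  | fuel + 1, dist, q =>
    match pvHeapPop q with
    | none => dist
    | some ((d, now), q') =>
      if PySem.List.pyGetD dist now 0 < d then pvALoop graph fuel dist q'
      else
        let s := (PySem.List.pyGetD graph now []).foldl (pvStepA d) (dist, q')
        pvALoop graph fuel s.1 s.2

def solution (n : Int) (edge : List (Int × Int)) : Int :=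
  let graph := pvBuildGraph n edge
  let dist := pvALoop graph (pvFuel n) (pvInitDist n) [(0, 1)]
  -- return distance.count(max(distance[1:]))  (max default unreachable: n ≥ 1 on Pre_)
  ((PySem.List.count dist
      (PySem.List.maxD (PySem.List.slice dist (some 1) none) (fun x => x) 0) : Nat) : Int)

-- ===== PORT B =====
-- body of B's inner 'for w in graph[v]' loop
def pvStepB (v : Int) (s : List Int × List Int) (w : Int) : List Int × List Int :=
  if PySem.List.pyGetD s.1 v 0 + 1 < PySem.List.pyGetD s.1 w 0 then
    (PySem.List.pySetD s.1 w (PySem.List.pyGetD s.1 v 0 + 1), s.2 ++ [w])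
  else s

def pvBLoop (graph : List (List Int)) : Nat → List Int → List Int → Int → List Int
  | 0, dist, _, _ => dist
  | fuel + 1, dist, queue, i =>
    if i < PySem.List.len queue then
      let v := PySem.List.pyGetD queue i 0
      let s := (PySem.List.pyGetD graph v []).foldl (pvStepB v) (dist, queue)
      pvBLoop graph fuel s.1 s.2 (i + 1)
    else dist

def solution_alt (n : Int) (edge : List (Int × Int)) : Int :=
  let graph := pvBuildGraph n edge
  let dist := pvBLoop graph (pvFuel n) (pvInitDist n) [1] 0
  ((PySem.List.count dist
      (PySem.List.maxD (PySem.List.slice dist (some 1) none) (fun x => x) 0) : Nat) : Int)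

-- ===== PRECONDITION & SPEC =====
-- Pre_ is exactly where the Python A returns: n ≥ 1 and every edge endpoint a valid
-- Python index into the (n+1)-element lists, i.e. -(n+1) ≤ v ≤ n (outside it A raises
-- IndexError; B raises there too).
def Pre_solution (n : Int) (edge : List (Int × Int)) : Prop :=
  1 ≤ n ∧ ∀ p ∈ edge, (-(n + 1) ≤ p.1 ∧ p.1 ≤ n) ∧ (-(n + 1) ≤ p.2 ∧ p.2 ≤ n)
instance (n : Int) (edge : List (Int × Int)) : Decidable (Pre_solution n edge) := by
  unfold Pre_solution; infer_instance

def pvWitness_solution : Int × (List (Int × Int)) := (3, [(1, 2), (2, -1), (3, 3)])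

def Spec_solution (n : Int) (edge : List (Int × Int)) (out : Int) : Prop :=
  out = solution_alt n edge
instance (n : Int) (edge : List (Int × Int)) (out : Int) : Decidable (Spec_solution n edge out) := by
  unfold Spec_solution; infer_instance

-- ===== CLAIM (what is proved, stated in full; the proofs are below) =====
def Claim_equal_solution : Prop := ∀ (n : Int) (edge : List (Int × Int)),
  Dom_solution n edge → Pre_solution n edge → Spec_solution n edge (solution n edge)

-- ===== LEMMAS AND PROOFS =====

-- Python index normalisation: for -N ≤ v < N the index v denotes position pvIdx N v
def pvIdx (N : Nat) (v : Int) : Nat := if 0 ≤ v then v.toNat else N - (-v).toNat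
def pvValid (N : Nat) (v : Int) : Prop := -(N : Int) ≤ v ∧ v < (N : Int)

lemma pvIdx_lt (N : Nat) (v : Int) (h : pvValid N v) : pvIdx N v < N := by
  rcases h with ⟨h1, h2⟩; unfold pvIdx; split <;> omega

lemma pvIdx?_eq (N : Nat) (v : Int) (h : pvValid N v) :
    PySem.List.pyIdx? N v = some (pvIdx N v) := by
  rcases h with ⟨h1, h2⟩
  simp only [PySem.List.pyIdx?, pvIdx]
  split_ifs <;> rfl

lemma pvGetD_norm {α : Type} (xs : List α) (v : Int) (dflt : α) (N : Nat)
    (hl : xs.length = N) (hv : pvValid N v) :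
    PySem.List.pyGetD xs v dflt = xs.getD (pvIdx N v) dflt := by
  have hk : pvIdx N v < N := pvIdx_lt N v hv
  simp only [PySem.List.pyGetD, PySem.List.pyGet?, hl, pvIdx?_eq N v hv, Option.bind_some]
  rw [List.getElem?_eq_getElem (by omega), List.getD_eq_getElem _ _ (by omega)]
  rfl

lemma pvSetD_norm {α : Type} (xs : List α) (v : Int) (c : α) (N : Nat)
    (hl : xs.length = N) (hv : pvValid N v) :
    PySem.List.pySetD xs v c = xs.set (pvIdx N v) c := by
  simp only [PySem.List.pySetD, PySem.List.pySet?, hl, pvIdx?_eq N v hv, Option.map_some,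
    Option.getD_some]

-- getD / set facts
lemma pvGetD_set_self {α : Type} (d : List α) (k : Nat) (hk : k < d.length) (v dflt : α) :
    (d.set k v).getD k dflt = v := by
  rw [List.getD_eq_getElem _ _ (by simpa using hk)]
  simp [List.getElem_set_self]

lemma pvGetD_set_ne {α : Type} (d : List α) (k j : Nat) (h : j ≠ k) (v dflt : α) :
    (d.set k v).getD j dflt = d.getD j dflt := by
  by_cases hj : j < d.length
  · rw [List.getD_eq_getElem _ _ (by simpa using hj), List.getD_eq_getElem _ _ hj]
    rw [List.getElem_set]
    simp [Ne.symm h]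
  · rw [List.getD_eq_default _ _ (by simp; omega), List.getD_eq_default _ _ (by omega)]

-- sum of (truncated) distances, the termination measure
def pvSum (d : List Int) : Nat := (d.map Int.toNat).sum

lemma pvSum_set (d : List Int) (k : Nat) (v : Int) : ∀ _hk : k < d.length,
    pvSum (d.set k v) + (d.getD k 0).toNat = pvSum d + v.toNat := by
  induction d generalizing k with
  | nil => intro hk; simp at hk
  | cons a t ih =>
    intro hk
    cases k with
    | zero => simp [pvSum, List.getD]; omega
    | succ k =>
      have := ih k (by simpa using hk)
      simp only [List.set_cons_succ, pvSum, List.map_cons, List.sum_cons] at *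
      have hgd : (a :: t).getD (k+1) 0 = t.getD k 0 := by simp [List.getD]
      rw [hgd]; omega

lemma pvSum_le (d : List Int) (h : ∀ j < d.length, d.getD j 0 ≤ 50000) :
    pvSum d ≤ 50000 * d.length := by
  induction d with
  | nil => simp [pvSum]
  | cons a t ih =>
    have h0 := h 0 (by simp)
    simp only [List.getD_cons_zero] at h0
    have ht : ∀ j < t.length, t.getD j 0 ≤ 50000 := by
      intro j hj
      have := h (j+1) (by simp; omega)
      simpa [List.getD] using this
    have := ih ht
    simp only [pvSum, List.map_cons, List.sum_cons, List.length_cons] at *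
    have : a.toNat ≤ 50000 := by omega
    ring_nf
    omega

-- the (multi-)graph on normalised node ids, and walks from node 1
def pvAdj (N : Nat) (graph : List (List Int)) (u j : Nat) : Prop :=
  ∃ x ∈ graph.getD u ([] : List Int), pvIdx N x = j

def pvW (N : Nat) (graph : List (List Int)) : Nat → Nat → Prop
  | 0, j => j = 1
  | k + 1, j => ∃ u, pvW N graph k u ∧ pvAdj N graph u j

def pvGood (N : Nat) (graph : List (List Int)) : Prop :=
  graph.length = N ∧ ∀ (j : Nat), ∀ x ∈ graph.getD j ([] : List Int), pvValid N x

-- characterisation of the common result: a valid, fully relaxed distance array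
def pvDistOK (N : Nat) (graph : List (List Int)) (d : List Int) : Prop :=
  d.length = N ∧ d.getD 1 0 = 0 ∧
  (∀ j < N, 0 ≤ d.getD j 0 ∧ d.getD j 0 ≤ 50000) ∧
  (∀ j < N, d.getD j 0 < 50000 → pvW N graph (d.getD j 0).toNat j)

def pvRelaxed (N : Nat) (graph : List (List Int)) (d : List Int) : Prop :=
  ∀ j < N, d.getD j 0 < 50000 →
    ∀ x ∈ graph.getD j ([] : List Int), d.getD (pvIdx N x) 0 ≤ d.getD j 0 + 1

lemma pvW_lt (N : Nat) (graph : List (List Int)) (hN : 2 ≤ N) (hg : pvGood N graph) :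
    ∀ k j, pvW N graph k j → j < N := by
  intro k
  induction k with
  | zero => intro j hj; simp only [pvW] at hj; omega
  | succ k ih =>
    intro j hj
    obtain ⟨u, _, x, hx, hix⟩ := hj
    exact hix ▸ pvIdx_lt N x (hg.2 u x hx)

lemma pvLe (N : Nat) (graph : List (List Int)) (d : List Int) (hN : 2 ≤ N)
    (hg : pvGood N graph) (hok : pvDistOK N graph d) (hr : pvRelaxed N graph d) :
    ∀ k : Nat, k ≤ 50000 → ∀ j, pvW N graph k j → d.getD j 0 ≤ (k : Int) := by
  intro k
  induction k with
  | zero =>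
    intro _ j hj; simp only [pvW] at hj; subst hj
    rw [hok.2.1]; simp
  | succ k ih =>
    intro hk j hj
    obtain ⟨u, hu, x, hx, hix⟩ := hj
    have hdu : d.getD u 0 ≤ (k : Int) := ih (by omega) u hu
    have hu' : u < N := pvW_lt N graph hN hg k u hu
    have hlt : d.getD u 0 < 50000 := by omega
    have := hr u hu' hlt x hx
    rw [hix] at this
    omega

lemma pvUnique (N : Nat) (graph : List (List Int)) (d d' : List Int) (hN : 2 ≤ N)
    (hg : pvGood N graph)
    (h1 : pvDistOK N graph d) (h2 : pvRelaxed N graph d)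
    (h3 : pvDistOK N graph d') (h4 : pvRelaxed N graph d') : d = d' := by
  have key : ∀ (a b : List Int), pvDistOK N graph a → pvRelaxed N graph a →
      pvDistOK N graph b → pvRelaxed N graph b → ∀ j < N, a.getD j 0 ≤ b.getD j 0 := by
    intro a b ha hra hb hrb j hj
    by_cases hbig : b.getD j 0 < 50000
    · have hw := hb.2.2.2 j hj hbig
      have hb0 : 0 ≤ b.getD j 0 := (hb.2.2.1 j hj).1
      have := pvLe N graph a hN hg ha hra (b.getD j 0).toNat (by omega) j hw
      omega
    · have := (ha.2.2.1 j hj).2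
      omega
  apply List.ext_getElem (by rw [h1.1, h3.1])
  intro j hj hj'
  have hjN : j < N := by rw [← h1.1]; exact hj
  have hle := key d d' h1 h2 h3 h4 j hjN
  have hge := key d' d h3 h4 h1 h2 j hjN
  rw [List.getD_eq_getElem _ _ hj, List.getD_eq_getElem _ _ hj'] at *
  omega

-- ===== invariants of A's loop =====
def pvQProp (N : Nat) (graph : List (List Int)) (d : List Int) (q : List (Int × Int)) : Prop :=
  ∀ e ∈ q, pvValid N e.2 ∧ 0 ≤ e.1 ∧ e.1 < 50000 ∧
    pvW N graph e.1.toNat (pvIdx N e.2) ∧ d.getD (pvIdx N e.2) 0 ≤ e.1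

def pvFrontA (N : Nat) (graph : List (List Int)) (d : List Int) (q : List (Int × Int)) : Prop :=
  ∀ j < N, d.getD j 0 < 50000 →
    (∃ e ∈ q, pvIdx N e.2 = j ∧ e.1 = d.getD j 0) ∨
    (∀ x ∈ graph.getD j ([] : List Int), d.getD (pvIdx N x) 0 ≤ d.getD j 0 + 1)

def pvInvA (N : Nat) (graph : List (List Int)) (d : List Int) (q : List (Int × Int)) : Prop :=
  pvDistOK N graph d ∧ pvQProp N graph d q ∧ pvFrontA N graph d q

lemma pvHeapMin_mem (x : Int × Int) (xs : List (Int × Int)) : pvHeapMin x xs ∈ x :: xs := by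
  induction xs generalizing x with
  | nil => simp [pvHeapMin]
  | cons a t ih =>
    have hstep : pvHeapMin x (a :: t) =
        pvHeapMin (if a.1 < x.1 ∨ (a.1 = x.1 ∧ a.2 < x.2) then a else x) t := rfl
    rw [hstep]
    rcases List.mem_cons.1 (ih (if a.1 < x.1 ∨ (a.1 = x.1 ∧ a.2 < x.2) then a else x)) with h3 | h3
    · rw [h3]; split <;> simp
    · simp [h3]

lemma pvHeapPop_some (q : List (Int × Int)) (e : Int × Int) (q' : List (Int × Int))
    (h : pvHeapPop q = some (e, q')) : e ∈ q ∧ q' = q.erase e := by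
  cases q with
  | nil => simp [pvHeapPop] at h
  | cons x xs =>
    have h' : (pvHeapMin x xs, (x :: xs).erase (pvHeapMin x xs)) = (e, q') := by
      simpa [pvHeapPop] using h
    obtain ⟨h1, h2⟩ := Prod.mk.injEq .. |>.mp h'
    subst h1; subst h2
    exact ⟨pvHeapMin_mem x xs, rfl⟩

lemma pvHeapPop_none (q : List (Int × Int)) (h : pvHeapPop q = none) : q = [] := by
  cases q with
  | nil => rfl
  | cons x xs => simp [pvHeapPop] at h

-- the inner relaxation loop of A
lemma pvFoldA (N : Nat) (graph : List (List Int)) (_hN : 2 ≤ N) (hg : pvGood N graph)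
    (dd now : Int) (hnow : pvValid N now) (hW : pvW N graph dd.toNat (pvIdx N now))
    (hdd0 : 0 ≤ dd) (hdd : dd < 50000) :
    ∀ (ns : List Int), (∀ x ∈ ns, x ∈ graph.getD (pvIdx N now) ([] : List Int)) →
    ∀ (d : List Int) (q : List (Int × Int)), pvDistOK N graph d → pvQProp N graph d q →
    d.getD (pvIdx N now) 0 = dd →
    pvDistOK N graph (ns.foldl (pvStepA dd) (d, q)).1 ∧
    pvQProp N graph (ns.foldl (pvStepA dd) (d, q)).1 (ns.foldl (pvStepA dd) (d, q)).2 ∧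
    (ns.foldl (pvStepA dd) (d, q)).1.getD (pvIdx N now) 0 = dd ∧
    (∀ j < N, (ns.foldl (pvStepA dd) (d, q)).1.getD j 0 ≤ d.getD j 0) ∧
    (∀ j < N, (ns.foldl (pvStepA dd) (d, q)).1.getD j 0 < d.getD j 0 →
      ∃ e ∈ (ns.foldl (pvStepA dd) (d, q)).2, pvIdx N e.2 = j ∧
        e.1 = (ns.foldl (pvStepA dd) (d, q)).1.getD j 0) ∧
    (∀ e ∈ q, e ∈ (ns.foldl (pvStepA dd) (d, q)).2) ∧
    (∀ x ∈ ns, (ns.foldl (pvStepA dd) (d, q)).1.getD (pvIdx N x) 0 ≤ dd + 1) ∧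
    pvSum (ns.foldl (pvStepA dd) (d, q)).1 + (ns.foldl (pvStepA dd) (d, q)).2.length ≤
      pvSum d + q.length := by
  intro ns
  induction ns with
  | nil =>
    intro _ d q hok hq hnow'
    refine ⟨hok, hq, hnow', ?_, ?_, ?_, ?_, ?_⟩ <;> simp
  | cons x ns ih =>
    intro hns d q hok hq hnow'
    have hl : d.length = N := hok.1
    have hxb : x ∈ graph.getD (pvIdx N now) ([] : List Int) := hns x List.mem_cons_self
    have hxv : pvValid N x := hg.2 _ x hxb
    have hixN : pvIdx N x < N := pvIdx_lt N x hxv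
    have hinowN : pvIdx N now < N := pvIdx_lt N now hnow
    have hstep : pvStepA dd (d, q) x =
        if dd + 1 < d.getD (pvIdx N x) 0 then
          (d.set (pvIdx N x) (dd + 1), q ++ [(dd + 1, x)]) else (d, q) := by
      show (if dd + 1 < PySem.List.pyGetD d x 0 then
          (PySem.List.pySetD d x (dd + 1), q ++ [(dd + 1, x)]) else (d, q)) = _
      rw [pvGetD_norm d x 0 N hl hxv, pvSetD_norm d x (dd + 1) N hl hxv]
    simp only [List.foldl_cons, hstep]
    by_cases hguard : dd + 1 < d.getD (pvIdx N x) 0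
    · rw [if_pos hguard]
      have hix1 : pvIdx N x ≠ 1 := by
        intro hh; rw [hh, hok.2.1] at hguard; omega
      have hixnow : pvIdx N x ≠ pvIdx N now := by
        intro hh; rw [hh, hnow'] at hguard; omega
      have hbx := hok.2.2.1 (pvIdx N x) hixN
      have hWx : pvW N graph (dd + 1).toNat (pvIdx N x) := by
        have : (dd + 1).toNat = dd.toNat + 1 := by omega
        rw [this]
        exact ⟨pvIdx N now, hW, ⟨x, hxb, rfl⟩⟩
      -- the stepped state satisfies the premises again
      have hok' : pvDistOK N graph (d.set (pvIdx N x) (dd + 1)) := by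
        refine ⟨by simpa using hl, ?_, ?_, ?_⟩
        · rw [pvGetD_set_ne d _ _ (Ne.symm hix1)]; exact hok.2.1
        · intro j hj
          by_cases hjx : j = pvIdx N x
          · subst hjx; rw [pvGetD_set_self d _ (by omega)]; omega
          · rw [pvGetD_set_ne d _ _ hjx]; exact hok.2.2.1 j hj
        · intro j hj hlt
          by_cases hjx : j = pvIdx N x
          · subst hjx; rw [pvGetD_set_self d _ (by omega)] at *; exact hWx
          · rw [pvGetD_set_ne d _ _ hjx] at *; exact hok.2.2.2 j hj hlt
      have hmono1 : ∀ j < N, (d.set (pvIdx N x) (dd + 1)).getD j 0 ≤ d.getD j 0 := by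
        intro j hj
        by_cases hjx : j = pvIdx N x
        · subst hjx; rw [pvGetD_set_self d _ (by omega)]; omega
        · rw [pvGetD_set_ne d _ _ hjx]
      have hq' : pvQProp N graph (d.set (pvIdx N x) (dd + 1)) (q ++ [(dd + 1, x)]) := by
        intro e he
        rcases List.mem_append.1 he with he | he
        · obtain ⟨e1, e2, e3, e4, e5⟩ := hq e he
          exact ⟨e1, e2, e3, e4, le_trans (hmono1 _ (pvIdx_lt N e.2 e1)) e5⟩
        · simp only [List.mem_singleton] at he; subst he
          refine ⟨hxv, by omega, by omega, hWx, ?_⟩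
          rw [pvGetD_set_self d _ (by omega)]
      have hnow'' : (d.set (pvIdx N x) (dd + 1)).getD (pvIdx N now) 0 = dd := by
        rw [pvGetD_set_ne d _ _ (Ne.symm hixnow)]; exact hnow'
      obtain ⟨c1, c2, c3, c4, c5, c6, c7, c8⟩ :=
        ih (fun y hy => hns y (List.mem_cons_of_mem x hy)) _ _ hok' hq' hnow''
      refine ⟨c1, c2, c3, ?_, ?_, ?_, ?_, ?_⟩
      · intro j hj; exact le_trans (c4 j hj) (hmono1 j hj)
      · -- decrease witness
        intro j hj hdec
        rcases lt_or_eq_of_le (c4 j hj) with hlt2 | heq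
        · exact c5 j hj hlt2
        · by_cases hjx : j = pvIdx N x
          · subst hjx
            refine ⟨(dd + 1, x), c6 _ (by simp), rfl, ?_⟩
            rw [heq, pvGetD_set_self d _ (by omega)]
          · rw [heq, pvGetD_set_ne d _ _ hjx] at hdec; omega
      · intro e he; exact c6 e (List.mem_append_left _ he)
      · intro y hy
        rcases List.mem_cons.1 hy with rfl | hy
        · have := c4 (pvIdx N y) (pvIdx_lt N y hxv)
          rw [pvGetD_set_self d _ (by omega)] at this
          exact this
        · exact c7 y hy
      · -- measure
        have hsum := pvSum_set d (pvIdx N x) (dd + 1) (by omega)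
        have htn : (d.getD (pvIdx N x) 0).toNat ≥ (dd + 1).toNat + 1 := by omega
        simp only [List.length_append, List.length_singleton] at c8 ⊢
        omega
    · rw [if_neg hguard]
      obtain ⟨c1, c2, c3, c4, c5, c6, c7, c8⟩ :=
        ih (fun y hy => hns y (List.mem_cons_of_mem x hy)) _ _ hok hq hnow'
      refine ⟨c1, c2, c3, c4, c5, c6, ?_, c8⟩
      intro y hy
      rcases List.mem_cons.1 hy with rfl | hy
      · exact le_trans (c4 (pvIdx N y) (pvIdx_lt N y hxv)) (by omega)
      · exact c7 y hy

lemma pvALoop_spec (N : Nat) (graph : List (List Int)) (hN : 2 ≤ N) (hg : pvGood N graph) :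
    ∀ (fuel : Nat) (d : List Int) (q : List (Int × Int)), pvInvA N graph d q →
    pvSum d + q.length ≤ fuel →
    pvDistOK N graph (pvALoop graph fuel d q) ∧ pvRelaxed N graph (pvALoop graph fuel d q) := by
  intro fuel
  induction fuel with
  | zero =>
    intro d q hinv hm
    have hq0 : q = [] := List.eq_nil_of_length_eq_zero (by omega)
    subst hq0
    refine ⟨hinv.1, fun j hj hlt => ?_⟩
    rcases hinv.2.2 j hj hlt with ⟨e, he, _⟩ | h
    · simp at he
    · exact h
  | succ f ih =>
    intro d q hinv hm
    cases hpop : pvHeapPop q with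
    | none =>
      have hq0 := pvHeapPop_none q hpop
      subst hq0
      have hrun : pvALoop graph (f + 1) d [] = d := by simp [pvALoop, pvHeapPop]
      rw [hrun]
      refine ⟨hinv.1, fun j hj hlt => ?_⟩
      rcases hinv.2.2 j hj hlt with ⟨e, he, _⟩ | h
      · simp at he
      · exact h
    | some r =>
      obtain ⟨⟨dd, now⟩, q'⟩ := r
      obtain ⟨hmem, hq'⟩ := pvHeapPop_some q _ _ hpop
      obtain ⟨hvnow, hdd0, hdd50, hWnow, hle⟩ := hinv.2.1 _ hmem
      dsimp only at hvnow hdd0 hdd50 hWnow hle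
      have hl : d.length = N := hinv.1.1
      have hinowN : pvIdx N now < N := pvIdx_lt N now hvnow
      have hnorm : PySem.List.pyGetD d now 0 = d.getD (pvIdx N now) 0 :=
        pvGetD_norm d now 0 N hl hvnow
      have hlen_q : q'.length = q.length - 1 := by
        rw [hq']; exact List.length_erase_of_mem hmem
      have hqlen : 1 ≤ q.length := List.length_pos_of_mem hmem
      have hq'sub : ∀ e ∈ q', e ∈ q := by
        intro e he; rw [hq'] at he; exact List.erase_subset he
      have hq'prop : pvQProp N graph d q' := fun e he => hinv.2.1 e (hq'sub e he)
      have hrun : pvALoop graph (f + 1) d q =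
          if PySem.List.pyGetD d now 0 < dd then pvALoop graph f d q'
          else
            pvALoop graph f ((PySem.List.pyGetD graph now []).foldl (pvStepA dd) (d, q')).1
              ((PySem.List.pyGetD graph now []).foldl (pvStepA dd) (d, q')).2 := by
        simp only [pvALoop, hpop]
      by_cases hskip : PySem.List.pyGetD d now 0 < dd
      · rw [hrun, if_pos hskip]
        rw [hnorm] at hskip
        have hfront : pvFrontA N graph d q' := by
          intro j hj hlt
          rcases hinv.2.2 j hj hlt with ⟨e, he, hie, heq⟩ | h
          · left
            have hne : e ≠ (dd, now) := by
              intro hh; subst hh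
              dsimp only at hie heq
              rw [hie] at hskip
              omega
            refine ⟨e, ?_, hie, heq⟩
            rw [hq']; exact (List.mem_erase_of_ne hne).2 he
          · right; exact h
        exact ih d q' ⟨hinv.1, hq'prop, hfront⟩ (by omega)
      · rw [hrun, if_neg hskip]
        rw [hnorm] at hskip
        have hnoweq : d.getD (pvIdx N now) 0 = dd := by omega
        have hbucket : PySem.List.pyGetD graph now ([] : List Int) =
            graph.getD (pvIdx N now) ([] : List Int) :=
          pvGetD_norm graph now ([] : List Int) N hg.1 hvnow
        rw [hbucket]
        obtain ⟨c1, c2, c3, c4, c5, c6, c7, c8⟩ :=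
          pvFoldA N graph hN hg dd now hvnow hWnow hdd0 hdd50
            (graph.getD (pvIdx N now) ([] : List Int)) (fun x hx => hx)
            d q' hinv.1 hq'prop hnoweq
        apply ih
        · refine ⟨c1, c2, ?_⟩
          intro j hj hlt
          by_cases hjnow : j = pvIdx N now
          · subst hjnow
            right
            intro y hy
            have := c7 y hy
            rw [c3]; omega
          · rcases lt_or_eq_of_le (c4 j hj) with hdec | heq
            · left; exact c5 j hj hdec
            · rw [heq] at hlt
              rcases hinv.2.2 j hj hlt with ⟨e, he, hie, heqd⟩ | h
              · left
                have hne : e ≠ (dd, now) := by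
                  intro hh; subst hh; simp at hie; exact hjnow hie.symm
                refine ⟨e, c6 e ?_, hie, by omega⟩
                rw [hq']; exact (List.mem_erase_of_ne hne).2 he
              · right
                intro y hy
                have h1 := h y hy
                have hyv : pvValid N y := hg.2 j y hy
                have h2 := c4 (pvIdx N y) (pvIdx_lt N y hyv)
                omega
        · omega

-- ===== invariants of B's loop =====
def pvQPropB (N : Nat) (d : List Int) (queue : List Int) : Prop :=
  ∀ v ∈ queue, pvValid N v ∧ d.getD (pvIdx N v) 0 < 50000

def pvFrontB (N : Nat) (graph : List (List Int)) (d : List Int) (queue : List Int)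
    (i : Nat) : Prop :=
  ∀ j < N, d.getD j 0 < 50000 →
    (∃ v ∈ queue.drop i, pvIdx N v = j) ∨
    (∀ x ∈ graph.getD j ([] : List Int), d.getD (pvIdx N x) 0 ≤ d.getD j 0 + 1)

def pvInvB (N : Nat) (graph : List (List Int)) (d : List Int) (queue : List Int)
    (i : Int) : Prop :=
  pvDistOK N graph d ∧ 0 ≤ i ∧ i.toNat ≤ queue.length ∧
  pvQPropB N d queue ∧ pvFrontB N graph d queue i.toNat

lemma pvFoldB (N : Nat) (graph : List (List Int)) (_hN : 2 ≤ N) (hg : pvGood N graph)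
    (v : Int) (hv : pvValid N v) (dd : Int)
    (hW : pvW N graph dd.toNat (pvIdx N v)) (hdd0 : 0 ≤ dd) (hdd : dd < 50000) :
    ∀ (ns : List Int), (∀ x ∈ ns, x ∈ graph.getD (pvIdx N v) ([] : List Int)) →
    ∀ (d : List Int) (q : List Int), pvDistOK N graph d → pvQPropB N d q →
    d.getD (pvIdx N v) 0 = dd →
    pvDistOK N graph (ns.foldl (pvStepB v) (d, q)).1 ∧
    pvQPropB N (ns.foldl (pvStepB v) (d, q)).1 (ns.foldl (pvStepB v) (d, q)).2 ∧
    (ns.foldl (pvStepB v) (d, q)).1.getD (pvIdx N v) 0 = dd ∧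
    (∀ j < N, (ns.foldl (pvStepB v) (d, q)).1.getD j 0 ≤ d.getD j 0) ∧
    (∃ t, (ns.foldl (pvStepB v) (d, q)).2 = q ++ t ∧
      (∀ j < N, (ns.foldl (pvStepB v) (d, q)).1.getD j 0 < d.getD j 0 →
        ∃ w ∈ t, pvIdx N w = j) ∧
      pvSum (ns.foldl (pvStepB v) (d, q)).1 + t.length ≤ pvSum d) ∧
    (∀ x ∈ ns, (ns.foldl (pvStepB v) (d, q)).1.getD (pvIdx N x) 0 ≤ dd + 1) := by
  intro ns
  induction ns with
  | nil =>
    intro _ d q hok hq hdv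
    refine ⟨hok, hq, hdv, by simp, ⟨[], by simp, by simp, by simp⟩, by simp⟩
  | cons x ns ih =>
    intro hns d q hok hq hdv
    have hl : d.length = N := hok.1
    have hxb : x ∈ graph.getD (pvIdx N v) ([] : List Int) := hns x List.mem_cons_self
    have hxv : pvValid N x := hg.2 _ x hxb
    have hixN : pvIdx N x < N := pvIdx_lt N x hxv
    have hivN : pvIdx N v < N := pvIdx_lt N v hv
    have hstep : pvStepB v (d, q) x =
        if dd + 1 < d.getD (pvIdx N x) 0 then
          (d.set (pvIdx N x) (dd + 1), q ++ [x]) else (d, q) := by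
      show (if PySem.List.pyGetD d v 0 + 1 < PySem.List.pyGetD d x 0 then
          (PySem.List.pySetD d x (PySem.List.pyGetD d v 0 + 1), q ++ [x]) else (d, q)) = _
      rw [pvGetD_norm d v 0 N hl hv, pvGetD_norm d x 0 N hl hxv,
        pvSetD_norm d x _ N hl hxv, hdv]
    simp only [List.foldl_cons, hstep]
    by_cases hguard : dd + 1 < d.getD (pvIdx N x) 0
    · rw [if_pos hguard]
      have hix1 : pvIdx N x ≠ 1 := by
        intro hh; rw [hh, hok.2.1] at hguard; omega
      have hixv : pvIdx N x ≠ pvIdx N v := by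
        intro hh; rw [hh, hdv] at hguard; omega
      have hbx := hok.2.2.1 (pvIdx N x) hixN
      have hWx : pvW N graph (dd + 1).toNat (pvIdx N x) := by
        have : (dd + 1).toNat = dd.toNat + 1 := by omega
        rw [this]
        exact ⟨pvIdx N v, hW, ⟨x, hxb, rfl⟩⟩
      have hok' : pvDistOK N graph (d.set (pvIdx N x) (dd + 1)) := by
        refine ⟨by simpa using hl, ?_, ?_, ?_⟩
        · rw [pvGetD_set_ne d _ _ (Ne.symm hix1)]; exact hok.2.1
        · intro j hj
          by_cases hjx : j = pvIdx N x
          · subst hjx; rw [pvGetD_set_self d _ (by omega)]; omega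
          · rw [pvGetD_set_ne d _ _ hjx]; exact hok.2.2.1 j hj
        · intro j hj hlt
          by_cases hjx : j = pvIdx N x
          · subst hjx; rw [pvGetD_set_self d _ (by omega)] at *; exact hWx
          · rw [pvGetD_set_ne d _ _ hjx] at *; exact hok.2.2.2 j hj hlt
      have hmono1 : ∀ j < N, (d.set (pvIdx N x) (dd + 1)).getD j 0 ≤ d.getD j 0 := by
        intro j hj
        by_cases hjx : j = pvIdx N x
        · subst hjx; rw [pvGetD_set_self d _ (by omega)]; omega
        · rw [pvGetD_set_ne d _ _ hjx]
      have hq' : pvQPropB N (d.set (pvIdx N x) (dd + 1)) (q ++ [x]) := by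
        intro w hw
        rcases List.mem_append.1 hw with hw | hw
        · obtain ⟨w1, w2⟩ := hq w hw
          exact ⟨w1, lt_of_le_of_lt (hmono1 _ (pvIdx_lt N w w1)) w2⟩
        · simp only [List.mem_singleton] at hw; subst hw
          refine ⟨hxv, ?_⟩
          rw [pvGetD_set_self d _ (by omega)]; omega
      have hdv' : (d.set (pvIdx N x) (dd + 1)).getD (pvIdx N v) 0 = dd := by
        rw [pvGetD_set_ne d _ _ (Ne.symm hixv)]; exact hdv
      obtain ⟨c1, c2, c3, c4, ⟨t, hteq, htwit, htsum⟩, c7⟩ :=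
        ih (fun y hy => hns y (List.mem_cons_of_mem x hy)) _ _ hok' hq' hdv'
      refine ⟨c1, c2, c3, ?_, ⟨x :: t, ?_, ?_, ?_⟩, ?_⟩
      · intro j hj; exact le_trans (c4 j hj) (hmono1 j hj)
      · rw [hteq]; simp
      · intro j hj hdec
        rcases lt_or_eq_of_le (c4 j hj) with hlt2 | heq
        · obtain ⟨w, hw, hiw⟩ := htwit j hj hlt2
          exact ⟨w, List.mem_cons_of_mem x hw, hiw⟩
        · by_cases hjx : j = pvIdx N x
          · exact ⟨x, List.mem_cons_self, hjx.symm⟩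
          · rw [heq, pvGetD_set_ne d _ _ hjx] at hdec; omega
      · have hsum := pvSum_set d (pvIdx N x) (dd + 1) (by omega)
        have htn : (d.getD (pvIdx N x) 0).toNat ≥ (dd + 1).toNat + 1 := by omega
        simp only [List.length_cons]
        omega
      · intro y hy
        rcases List.mem_cons.1 hy with rfl | hy
        · have := c4 (pvIdx N y) (pvIdx_lt N y hxv)
          rw [pvGetD_set_self d _ (by omega)] at this
          exact this
        · exact c7 y hy
    · rw [if_neg hguard]
      obtain ⟨c1, c2, c3, c4, ⟨t, hteq, htwit, htsum⟩, c7⟩ :=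
        ih (fun y hy => hns y (List.mem_cons_of_mem x hy)) _ _ hok hq hdv
      refine ⟨c1, c2, c3, c4, ⟨t, hteq, htwit, htsum⟩, ?_⟩
      intro y hy
      rcases List.mem_cons.1 hy with rfl | hy
      · exact le_trans (c4 (pvIdx N y) (pvIdx_lt N y hxv)) (by omega)
      · exact c7 y hy

lemma pvBLoop_spec (N : Nat) (graph : List (List Int)) (hN : 2 ≤ N) (hg : pvGood N graph) :
    ∀ (fuel : Nat) (d : List Int) (queue : List Int) (i : Int), pvInvB N graph d queue i →
    pvSum d + (queue.length - i.toNat) ≤ fuel →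
    pvDistOK N graph (pvBLoop graph fuel d queue i) ∧
    pvRelaxed N graph (pvBLoop graph fuel d queue i) := by
  intro fuel
  induction fuel with
  | zero =>
    intro d queue i hinv hm
    have hdrop : queue.drop i.toNat = [] := List.drop_eq_nil_of_le (by omega)
    refine ⟨hinv.1, fun j hj hlt => ?_⟩
    rcases hinv.2.2.2.2 j hj hlt with ⟨w, hw, _⟩ | h
    · rw [hdrop] at hw; simp at hw
    · exact h
  | succ f ih =>
    intro d queue i hinv hm
    obtain ⟨hok, hi0, hile, hqp, hfront⟩ := hinv
    have hl : d.length = N := hok.1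
    by_cases hcond : i < PySem.List.len queue
    · have hilen : i.toNat < queue.length := by
        simp only [PySem.List.len_eq] at hcond; omega
      have hv_eq : PySem.List.pyGetD queue i 0 = queue[i.toNat] :=
        PySem.List.pyGetD_eq_getElem queue 0 hi0 (by omega)
      have hrun : pvBLoop graph (f + 1) d queue i =
          pvBLoop graph f
            ((PySem.List.pyGetD graph (queue[i.toNat]) []).foldl (pvStepB (queue[i.toNat]))
              (d, queue)).1
            ((PySem.List.pyGetD graph (queue[i.toNat]) []).foldl (pvStepB (queue[i.toNat]))
              (d, queue)).2 (i + 1) := by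
        simp only [pvBLoop, if_pos hcond, hv_eq]
      rw [hrun]
      have hvmem : queue[i.toNat] ∈ queue := List.getElem_mem hilen
      obtain ⟨hvv, hv50⟩ := hqp _ hvmem
      have hivN : pvIdx N (queue[i.toNat]) < N := pvIdx_lt N _ hvv
      have hdd0 : 0 ≤ d.getD (pvIdx N (queue[i.toNat])) 0 := (hok.2.2.1 _ hivN).1
      have hW : pvW N graph (d.getD (pvIdx N (queue[i.toNat])) 0).toNat
          (pvIdx N (queue[i.toNat])) := hok.2.2.2 _ hivN hv50
      have hbucket : PySem.List.pyGetD graph (queue[i.toNat]) ([] : List Int) =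
          graph.getD (pvIdx N (queue[i.toNat])) ([] : List Int) :=
        pvGetD_norm graph _ ([] : List Int) N hg.1 hvv
      rw [hbucket]
      obtain ⟨c1, c2, c3, c4, ⟨t, hteq, htwit, htsum⟩, c7⟩ :=
        pvFoldB N graph hN hg (queue[i.toNat]) hvv (d.getD (pvIdx N (queue[i.toNat])) 0)
          hW hdd0 hv50 (graph.getD (pvIdx N (queue[i.toNat])) ([] : List Int))
          (fun x hx => hx) d queue hok hqp rfl
      have hlen2 : (((graph.getD (pvIdx N (queue[i.toNat])) ([] : List Int)).foldl
          (pvStepB (queue[i.toNat])) (d, queue)).2).length = queue.length + t.length := by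
        rw [hteq]; simp
      have hi1 : (i + 1).toNat = i.toNat + 1 := by omega
      apply ih
      · refine ⟨c1, by omega, by omega, c2, ?_⟩
        intro j hj hlt
        by_cases hjv : j = pvIdx N (queue[i.toNat])
        · subst hjv
          right
          intro y hy
          have := c7 y hy
          rw [c3]; omega
        · rcases lt_or_eq_of_le (c4 j hj) with hdec | heq
          · obtain ⟨w, hw, hiw⟩ := htwit j hj hdec
            left
            refine ⟨w, ?_, hiw⟩
            rw [hteq, hi1, List.drop_append_of_le_length (by omega)]
            exact List.mem_append_right _ hw
          · rw [heq] at hlt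
            rcases hfront j hj hlt with ⟨w, hw, hiw⟩ | h
            · left
              rw [List.drop_eq_getElem_cons hilen] at hw
              rcases List.mem_cons.1 hw with rfl | hw
              · exact absurd hiw.symm hjv
              · refine ⟨w, ?_, hiw⟩
                rw [hteq, hi1, List.drop_append_of_le_length (by omega)]
                exact List.mem_append_left _ hw
            · right
              intro y hy
              have h1 := h y hy
              have hyv : pvValid N y := hg.2 j y hy
              have h2 := c4 (pvIdx N y) (pvIdx_lt N y hyv)
              omega
      · rw [hlen2]; omega
    · have hrun : pvBLoop graph (f + 1) d queue i = d := by
        simp only [pvBLoop, if_neg hcond]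
      rw [hrun]
      have hdrop : queue.drop i.toNat = [] := by
        apply List.drop_eq_nil_of_le
        simp only [PySem.List.len_eq] at hcond; omega
      refine ⟨hok, fun j hj hlt => ?_⟩
      rcases hfront j hj hlt with ⟨w, hw, _⟩ | h
      · rw [hdrop] at hw; simp at hw
      · exact h

-- ===== the built graph is good, the initial state satisfies both invariants =====
lemma pvIdx?_lt (m : Nat) (i : Int) (k : Nat) (h : PySem.List.pyIdx? m i = some k) : k < m := by
  unfold PySem.List.pyIdx? at h
  split_ifs at h <;> simp only [Option.some_inj] at h <;> omega

lemma pvAppendAt_length (g : List (List Int)) (v x : Int) :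
    (pvAppendAt g v x).length = g.length := PySem.List.length_pySetD g v _

lemma pvAppendAt_mem (g : List (List Int)) (v x : Int) (j : Nat) (y : Int)
    (hy : y ∈ (pvAppendAt g v x).getD j ([] : List Int)) : y ∈ g.getD j ([] : List Int) ∨ y = x := by
  unfold pvAppendAt PySem.List.pySetD PySem.List.pySet? at hy
  cases hidx : PySem.List.pyIdx? g.length v with
  | none => rw [hidx] at hy; simpa using Or.inl hy
  | some k =>
    rw [hidx] at hy
    simp only [Option.map_some, Option.getD_some] at hy
    have hk : k < g.length := pvIdx?_lt g.length v k hidx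
    by_cases hjk : j = k
    · subst hjk
      rw [pvGetD_set_self g j hk] at hy
      have hb : PySem.List.pyGetD g v ([] : List Int) = g.getD j ([] : List Int) := by
        simp only [PySem.List.pyGetD, PySem.List.pyGet?, hidx, Option.bind_some]
        rw [List.getElem?_eq_getElem hk, List.getD_eq_getElem _ _ hk]; rfl
      rw [hb] at hy
      rcases List.mem_append.1 hy with h | h
      · exact Or.inl h
      · simp at h; exact Or.inr h
    · rw [pvGetD_set_ne g k j hjk] at hy; exact Or.inl hy

lemma pvBuildAux (N : Nat) : ∀ (es : List (Int × Int)) (g : List (List Int)),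
    g.length = N → (∀ (j : Nat), ∀ y ∈ g.getD j ([] : List Int), pvValid N y) →
    (∀ p ∈ es, pvValid N p.1 ∧ pvValid N p.2) →
    pvGood N (es.foldl (fun g p => pvAppendAt (pvAppendAt g p.1 p.2) p.2 p.1) g) := by
  intro es
  induction es with
  | nil => intro g h1 h2 _; exact ⟨h1, h2⟩
  | cons p t ih =>
    intro g h1 h2 h3
    simp only [List.foldl_cons]
    apply ih
    · rw [pvAppendAt_length, pvAppendAt_length]; exact h1
    · intro j y hy
      rcases pvAppendAt_mem _ _ _ _ _ hy with hy2 | rfl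
      · rcases pvAppendAt_mem _ _ _ _ _ hy2 with hy3 | rfl
        · exact h2 j y hy3
        · exact (h3 p (List.mem_cons_self)).2
      · exact (h3 p (List.mem_cons_self)).1
    · intro q hq; exact h3 q (List.mem_cons_of_mem p hq)

lemma pvBuild_good (n : Int) (edge : List (Int × Int)) (hn : 1 ≤ n)
    (he : ∀ p ∈ edge, (-(n + 1) ≤ p.1 ∧ p.1 ≤ n) ∧ (-(n + 1) ≤ p.2 ∧ p.2 ≤ n)) :
    pvGood ((n + 1).toNat) (pvBuildGraph n edge) := by
  have hcast : (((n + 1).toNat : Nat) : Int) = n + 1 := Int.toNat_of_nonneg (by omega)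
  apply pvBuildAux
  · simp
  · intro j y hy
    by_cases hj : j < (n + 1).toNat
    · rw [List.getD_replicate _ hj] at hy; simp at hy
    · rw [List.getD_eq_default _ _ (by simp; omega)] at hy; simp at hy
  · intro p hp
    have := he p hp
    constructor <;> constructor <;> omega

lemma pvInit_getD (n : Int) (hn : 1 ≤ n) (j : Nat) (hj : j < (n + 1).toNat) :
    (pvInitDist n).getD j 0 = if j = 1 then 0 else 50000 := by
  have hN : 2 ≤ (n + 1).toNat := by omega
  have h1 : pvInitDist n = (List.replicate (n + 1).toNat (50000 : Int)).set 1 0 := by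
    unfold pvInitDist
    rw [PySem.List.pySetD_of_nonneg _ _ (by omega)]; rfl
  rw [h1]
  by_cases hj1 : j = 1
  · subst hj1; rw [pvGetD_set_self _ _ (by simp; omega)]; simp
  · rw [pvGetD_set_ne _ _ _ hj1, List.getD_replicate _ hj]; simp [hj1]

lemma pvInit_ok (n : Int) (edge : List (Int × Int)) (hn : 1 ≤ n) :
    pvDistOK ((n + 1).toNat) (pvBuildGraph n edge) (pvInitDist n) := by
  have hN : 2 ≤ (n + 1).toNat := by omega
  have hlen : (pvInitDist n).length = (n + 1).toNat := by
    unfold pvInitDist; rw [PySem.List.length_pySetD]; simp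
  refine ⟨hlen, ?_, ?_, ?_⟩
  · rw [pvInit_getD n hn 1 (by omega)]; simp
  · intro j hj; rw [pvInit_getD n hn j hj]; split <;> omega
  · intro j hj hlt
    rw [pvInit_getD n hn j hj] at hlt
    by_cases hj1 : j = 1
    · subst hj1
      rw [pvInit_getD n hn 1 (by omega)]
      simp [pvW]
    · rw [if_neg hj1] at hlt; omega

-- ===== assembly =====
theorem pvMain (n : Int) (edge : List (Int × Int)) (hn : 1 ≤ n)
    (he : ∀ p ∈ edge, (-(n + 1) ≤ p.1 ∧ p.1 ≤ n) ∧ (-(n + 1) ≤ p.2 ∧ p.2 ≤ n)) :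
    pvALoop (pvBuildGraph n edge) (pvFuel n) (pvInitDist n) [(0, 1)] =
    pvBLoop (pvBuildGraph n edge) (pvFuel n) (pvInitDist n) [1] 0 := by
  have hN : 2 ≤ (n + 1).toNat := by omega
  have hg := pvBuild_good n edge hn he
  have hok := pvInit_ok n edge hn
  have hidx1 : pvIdx (n + 1).toNat 1 = 1 := by unfold pvIdx; simp
  have hval1 : pvValid (n + 1).toNat 1 := ⟨by omega, by omega⟩
  have hlen : (pvInitDist n).length = (n + 1).toNat := hok.1
  have hsum : pvSum (pvInitDist n) ≤ 50000 * (n + 1).toNat := by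
    have := pvSum_le (pvInitDist n)
      (fun j hj => (hok.2.2.1 j (by omega)).2)
    omega
  have hfuel : pvSum (pvInitDist n) + 1 ≤ pvFuel n := by
    unfold pvFuel; omega
  -- A's initial invariant
  have hqa : pvQProp (n + 1).toNat (pvBuildGraph n edge) (pvInitDist n) [(0, 1)] := by
    intro e he
    simp only [List.mem_singleton] at he; subst he
    refine ⟨hval1, by omega, by omega, ?_, ?_⟩
    · dsimp only; rw [hidx1]; simp [pvW]
    · dsimp only; rw [hidx1, hok.2.1]
  have hfa : pvFrontA (n + 1).toNat (pvBuildGraph n edge) (pvInitDist n) [(0, 1)] := by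
    intro j hj hlt
    rw [pvInit_getD n hn j hj] at hlt
    by_cases hj1 : j = 1
    · subst hj1
      left
      refine ⟨(0, 1), List.mem_singleton_self _, by simpa using hidx1, ?_⟩
      dsimp only; rw [hok.2.1]
    · rw [if_neg hj1] at hlt; omega
  have hA := pvALoop_spec (n + 1).toNat (pvBuildGraph n edge) hN hg (pvFuel n)
    (pvInitDist n) [(0, 1)] ⟨hok, hqa, hfa⟩ (by simpa using hfuel)
  -- B's initial invariant
  have hqb : pvQPropB (n + 1).toNat (pvInitDist n) [1] := by
    intro v hv
    simp only [List.mem_singleton] at hv; subst hv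
    refine ⟨hval1, ?_⟩
    rw [hidx1, hok.2.1]; omega
  have hfb : pvFrontB (n + 1).toNat (pvBuildGraph n edge) (pvInitDist n) [1]
      ((0 : Int).toNat) := by
    intro j hj hlt
    rw [pvInit_getD n hn j hj] at hlt
    by_cases hj1 : j = 1
    · subst hj1
      left
      exact ⟨1, by simp, hidx1⟩
    · rw [if_neg hj1] at hlt; omega
  have hB := pvBLoop_spec (n + 1).toNat (pvBuildGraph n edge) hN hg (pvFuel n)
    (pvInitDist n) [1] 0 ⟨hok, by omega, by simp, hqb, hfb⟩ (by simpa using hfuel)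
  exact pvUnique (n + 1).toNat (pvBuildGraph n edge) _ _ hN hg hA.1 hA.2 hB.1 hB.2

-- ===== VERDICT (by name: the statement is the Claim_ definition above) =====
theorem solution_spec : Claim_equal_solution := by
  intro n edge _ hpre
  unfold Spec_solution solution solution_alt
  simp only [pvMain n edge hpre.1 hpre.2]
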